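-- pv_equiv track=rewrite | github.com/kentavr34/ragimoff.org | fix_xbt_no_dash.py | sentence_case
-- ===== SOURCE A (Python) =====
-- def sentence_case(text):
--     if not text:
--         return text
--     words = text.split()
--     result = []
--     for i, word in enumerate(words):
--         if word.isupper() and len(word) >= 2:
--             result.append(word)  # ALL CAPS — аббревиатуры
--         elif i == 0:
--             low = word.lower()
--             result.append(low[0].upper() + low[1:])
--         else:
--             result.append(word.lower())
--     return ' '.join(result)
-- ===== SOURCE B (Python) =====
-- def sentence_case(text):
--     # character-level scanner: no split()/join(); walk the string with two
--     # pointers, emit each word (with its separator) as it is found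
--     out = []
--     i, n = 0, len(text)
--     first = True
--     while i < n:
--         if text[i].isspace():
--             i += 1
--             continue
--         j = i
--         while j < n and not text[j].isspace():
--             j += 1
--         w = text[i:j]
--         if w.isupper() and len(w) >= 2:
--             piece = w
--         elif first:
--             low = w.lower()
--             piece = low[0].upper() + low[1:]
--         else:
--             piece = w.lower()
--         if not first:
--             out.append(' ')
--         out.append(piece)
--         first = False
--         i = j
--     return ''.join(out)
-- ===== Notes on version B (the rewrite author's own statement) =====
-- stated objective: alternative
-- what changed: Replaced A's split()/enumerate/join pipeline by a single character-level scanner: two index pointers find each word in place, the piece and its separator are appended incrementally, and a boolean flag marks the first word; no intermediate word list is built.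
import Mathlib
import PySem

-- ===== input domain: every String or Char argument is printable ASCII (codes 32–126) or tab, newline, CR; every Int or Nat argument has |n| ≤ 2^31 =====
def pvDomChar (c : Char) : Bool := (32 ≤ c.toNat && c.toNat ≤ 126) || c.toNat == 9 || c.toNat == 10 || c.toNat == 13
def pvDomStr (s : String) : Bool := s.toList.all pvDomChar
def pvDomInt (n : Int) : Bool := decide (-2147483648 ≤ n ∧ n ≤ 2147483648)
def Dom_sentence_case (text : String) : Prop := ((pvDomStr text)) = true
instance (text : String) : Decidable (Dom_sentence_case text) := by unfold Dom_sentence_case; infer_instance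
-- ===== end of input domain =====

-- B replaces A's split()/enumerate/join pipeline by a character-level scanner
-- (two-pointer word extraction, incremental output); objective: alternative.
-- Exact equivalence is proved.

-- ===== PORT A =====
-- word.isupper(): at least one cased char, no lowercase cased char (exact on the ASCII domain)
def pyWordIsUpper (cs : List Char) : Bool :=
  cs.any PySem.Chars.isupper && !(cs.any PySem.Chars.islower)

-- low[0].upper() + low[1:]  (words from split() are nonempty, so the [] case is unreachable)
def pyCapFirst (cs : List Char) : List Char :=
  match cs with
  | [] => []
  | c :: rest => PySem.Chars.upperChar c :: rest

-- the 'for i, word in enumerate(words)' loop of A, state = (i, result)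
def sentenceCaseLoop (i : Nat) (acc : List String) (ws : List String) : List String :=
  match ws with
  | [] => acc
  | w :: rest =>
      if pyWordIsUpper w.toList && decide (2 ≤ w.toList.length) then
        sentenceCaseLoop (i + 1) (acc ++ [w]) rest
      else if i = 0 then
        sentenceCaseLoop (i + 1) (acc ++ [String.ofList (pyCapFirst (PySem.Str.lower w).toList)]) rest
      else
        sentenceCaseLoop (i + 1) (acc ++ [PySem.Str.lower w]) rest

def sentence_case (text : String) : String :=
  if text = "" then text
  else PySem.Str.join " " (sentenceCaseLoop 0 [] (PySem.Str.split₀ text))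

-- ===== PORT B =====
-- the inner 'while j < n and not text[j].isspace(): j += 1' scan:
-- returns (the word text[i:j], the rest of the string from j)
def wordSpan (cs : List Char) : List Char × List Char :=
  match cs with
  | [] => ([], [])
  | c :: rest =>
      if PySem.Chars.isspace c then ([], c :: rest)
      else
        let p := wordSpan rest
        (c :: p.1, p.2)

-- termination fact for the outer loop (cited in decreasing_by)
theorem wordSpan_snd_length (cs : List Char) : (wordSpan cs).2.length ≤ cs.length := by
  induction cs with
  | nil => simp [wordSpan]
  | cons c rest ih =>
      simp only [wordSpan]
      split
      · simp
      · simpa using Nat.le_succ_of_le ih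

-- the if/elif/else computing 'piece' in Source B
def classifyB (first : Bool) (w : List Char) : List Char :=
  if pyWordIsUpper w && decide (2 ≤ w.length) then w
  else if first then pyCapFirst (PySem.Chars.lower w)
  else PySem.Chars.lower w

-- the outer 'while i < n' loop of Source B, state = (first, remaining characters)
def scanB (first : Bool) (cs : List Char) : List Char :=
  match cs with
  | [] => []
  | c :: rest =>
      if h : PySem.Chars.isspace c then scanB first rest  -- h is cited in decreasing_by
      else
        let p := wordSpan (c :: rest)
        (if first then [] else [' ']) ++ classifyB first p.1 ++ scanB false p.2
termination_by cs.length
decreasing_by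
  · simp
  · have := wordSpan_snd_length rest
    simp [wordSpan, h]
    omega

def sentence_case_alt (text : String) : String :=
  String.ofList (scanB true text.toList)

-- ===== PRECONDITION & SPEC =====
def Spec_sentence_case (text : String) (out : String) : Prop := out = sentence_case_alt text
instance (text : String) (out : String) : Decidable (Spec_sentence_case text out) := by unfold Spec_sentence_case; infer_instance

-- ===== CLAIM (what is proved, stated in full; the proofs are below) =====
def Claim_equal_sentence_case : Prop := ∀ (text : String), Dom_sentence_case text → Spec_sentence_case text (sentence_case text)

-- ===== LEMMAS AND PROOFS =====

-- specification-side splitter: the word structure of a string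
def wsplit (cs : List Char) : List (List Char) :=
  match cs with
  | [] => []
  | c :: rest =>
      if PySem.Chars.isspace c then wsplit rest
      else (c :: rest.takeWhile (fun x => !PySem.Chars.isspace x)) ::
           wsplit (rest.dropWhile (fun x => !PySem.Chars.isspace x))
termination_by cs.length
decreasing_by
  · simp
  · have := List.length_dropWhile_le (p := fun x => !PySem.Chars.isspace x) (l := rest)
    simp only [List.length_cons]
    omega

theorem wordSpan_eq (cs : List Char) :
    wordSpan cs = (cs.takeWhile (fun x => !PySem.Chars.isspace x),
                   cs.dropWhile (fun x => !PySem.Chars.isspace x)) := by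
  induction cs with
  | nil => simp [wordSpan]
  | cons c rest ih =>
      simp only [wordSpan, List.takeWhile, List.dropWhile]
      by_cases h : PySem.Chars.isspace c
      · simp [h]
      · simp [h, ih]

theorem go_spec (cs : List Char) : ∀ (cur : List Char) (acc : List (List Char)),
    PySem.Chars.split₀.go cs cur acc =
      acc.reverse ++
        (if cur = [] then wsplit cs
         else (cur.reverse ++ cs.takeWhile (fun x => !PySem.Chars.isspace x)) ::
              wsplit (cs.dropWhile (fun x => !PySem.Chars.isspace x))) := by
  induction cs with
  | nil =>
      intro cur acc
      by_cases h : cur = []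
      · simp [PySem.Chars.split₀.go, h, wsplit]
      · simp [PySem.Chars.split₀.go, h, wsplit, List.isEmpty_iff]
  | cons c rest ih =>
      intro cur acc
      by_cases hs : PySem.Chars.isspace c
      · by_cases h : cur = []
        · simp [PySem.Chars.split₀.go, hs, h, ih, wsplit]
        · simp [PySem.Chars.split₀.go, hs, h, List.isEmpty_iff, ih, wsplit]
      · by_cases h : cur = []
        · simp [PySem.Chars.split₀.go, hs, h, ih, wsplit]
        · simp [PySem.Chars.split₀.go, hs, h, ih,
                List.takeWhile, List.dropWhile]

theorem split₀_eq_wsplit (cs : List Char) : PySem.Chars.split₀ cs = wsplit cs := by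
  have := go_spec cs [] []
  simpa [PySem.Chars.split₀] using this

-- rendered output of a word list, with the first-word flag
def renderW (first : Bool) (ws : List (List Char)) : List Char :=
  match ws with
  | [] => []
  | w :: rest => (if first then [] else [' ']) ++ classifyB first w ++ renderW false rest

theorem scanB_eq_render (cs : List Char) :
    ∀ (first : Bool), scanB first cs = renderW first (wsplit cs) := by
  induction cs using wsplit.induct with
  | case1 => intro first; simp [scanB, wsplit, renderW]
  | case2 c rest h ih =>
      intro first
      rw [scanB, wsplit, dif_pos h, if_pos h]
      exact ih first
  | case3 c rest h ih =>
      intro first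
      rw [scanB, wsplit, dif_neg h, if_neg h, wordSpan_eq, renderW]
      simp only [List.takeWhile, List.dropWhile, h, Bool.not_false]
      rw [ih false]

theorem renderW_false (ws : List (List Char)) :
    renderW false ws = ws.flatMap (fun w => ' ' :: classifyB false w) := by
  induction ws with
  | nil => simp [renderW]
  | cons w rest ih => simp [renderW, ih]

theorem join_space (x : List Char) (ps : List (List Char)) :
    PySem.Chars.join [' '] (x :: ps) = x ++ ps.flatMap (fun w => ' ' :: w) := by
  induction ps generalizing x with
  | nil => simp [PySem.Chars.join_singleton]
  | cons y ps ih =>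
      rw [PySem.Chars.join_cons_cons, ih]
      simp

-- once i ≥ 1 the i==0 branch of A's loop is dead: the loop is a plain map
theorem sentenceCaseLoop_pos (ws : List String) (i : Nat) (acc : List String) (hi : i ≠ 0) :
    sentenceCaseLoop i acc ws =
      acc ++ ws.map (fun w =>
        if pyWordIsUpper w.toList && decide (2 ≤ w.toList.length) then w else PySem.Str.lower w) := by
  induction ws generalizing i acc with
  | nil => simp [sentenceCaseLoop]
  | cons w rest ih =>
      simp only [sentenceCaseLoop, List.map_cons]
      by_cases h : (pyWordIsUpper w.toList && decide (2 ≤ w.toList.length)) = true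
      · rw [if_pos h, ih (i + 1) _ (Nat.succ_ne_zero i), if_pos h, List.append_assoc]; rfl
      · rw [if_neg h, if_neg hi, ih (i + 1) _ (Nat.succ_ne_zero i), if_neg h, List.append_assoc]; rfl

-- per-word agreement of A's non-first branch pair with classifyB false
theorem f_toList (r : List Char) :
    (if pyWordIsUpper (String.ofList r).toList && decide (2 ≤ (String.ofList r).toList.length)
     then String.ofList r else PySem.Str.lower (String.ofList r)).toList
      = classifyB false r := by
  simp only [String.toList_ofList, classifyB, Bool.false_eq_true, if_false]
  by_cases h : (pyWordIsUpper r && decide (2 ≤ r.length)) = true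
  · rw [if_pos h, if_pos h, String.toList_ofList]
  · rw [if_neg h, if_neg h]
    simp

-- A's whole loop, read back at the character level
theorem loop_join (w : List Char) (rest : List (List Char)) :
    (sentenceCaseLoop 0 [] ((w :: rest).map String.ofList)).map String.toList
      = classifyB true w :: rest.map (classifyB false) := by
  simp only [List.map_cons, sentenceCaseLoop, String.toList_ofList]
  by_cases hcl : (pyWordIsUpper w && decide (2 ≤ w.length)) = true
  · rw [if_pos hcl, sentenceCaseLoop_pos _ 1 _ one_ne_zero]
    simp only [List.nil_append, List.singleton_append, List.map_cons]
    rw [List.map_map, List.map_map, String.toList_ofList]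
    rw [show classifyB true w = w from by rw [classifyB, if_pos hcl]]
    exact congrArg (w :: ·) (List.map_congr_left (fun r _ => f_toList r))
  · rw [if_neg hcl, if_pos trivial, sentenceCaseLoop_pos _ 1 _ one_ne_zero]
    simp only [List.nil_append, List.singleton_append, List.map_cons]
    rw [List.map_map, List.map_map, String.toList_ofList]
    rw [show classifyB true w = pyCapFirst (PySem.Chars.lower w) from by simp [classifyB, hcl]]
    rw [show (PySem.Str.lower (String.ofList w)).toList = PySem.Chars.lower w from by simp]
    exact congrArg (_ :: ·) (List.map_congr_left (fun r _ => f_toList r))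

theorem sentence_case_eq_alt (text : String) : sentence_case text = sentence_case_alt text := by
  unfold sentence_case sentence_case_alt
  by_cases ht : text = ""
  · subst ht
    rw [if_pos rfl, scanB_eq_render, show ("" : String).toList = [] from by decide,
      show wsplit [] = [] from by rw [wsplit]]
    decide
  · rw [if_neg ht, scanB_eq_render text.toList true, ← split₀_eq_wsplit]
    simp only [PySem.Str.split₀, PySem.Str.join]
    cases hw : PySem.Chars.split₀ text.toList with
    | nil => simp [sentenceCaseLoop, renderW, PySem.Chars.join, List.intercalate]
    | cons w rest =>
        rw [loop_join w rest]
        have hsep : (" " : String).toList = [' '] := by decide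
        rw [hsep, join_space, renderW, renderW_false, List.flatMap_map]
        simp

-- ===== VERDICT (by name: the statement is the Claim_ definition above) =====
theorem sentence_case_spec : Claim_equal_sentence_case := by
  intro text _
  unfold Spec_sentence_case
  exact sentence_case_eq_alt text
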